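-- pv_equiv track=rewrite | github.com/joselado/dftpy | src/dftpy/elkio.py | afterpat
-- ===== SOURCE A (Python) =====
-- def afterpat(f,pat,nl):
--   """ Get nl lines after the pattern pat in lines f"""
--   store=False
--   listline=[]
--   count=0
--   for line in f:
--     if store:
--       listline=listline+[line]
--       count=count+1
--     if pat in line:
--       store=True
--     if count == nl:
--       break
--   return listline
-- ===== SOURCE B (Python) =====
-- def afterpat(f, pat, nl):
--   """ Get nl lines after the pattern pat in lines f"""
--   it = iter(f)
--   for line in it:
--     if pat in line:
--       break
--   else:
--     return []
--   listline = []
--   for line in it: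
--     if len(listline) == nl:
--       break
--     listline.append(line)
--   return listline
-- ===== Notes on version B (the rewrite author's own statement) =====
-- stated objective: idiomatic
-- what changed: Replaces the single flag-driven loop with its store/count state by two phases over one shared iterator: first scan to the pattern line, then collect until nl lines are gathered (len check, so nl<=0 behaves identically).
import Mathlib
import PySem

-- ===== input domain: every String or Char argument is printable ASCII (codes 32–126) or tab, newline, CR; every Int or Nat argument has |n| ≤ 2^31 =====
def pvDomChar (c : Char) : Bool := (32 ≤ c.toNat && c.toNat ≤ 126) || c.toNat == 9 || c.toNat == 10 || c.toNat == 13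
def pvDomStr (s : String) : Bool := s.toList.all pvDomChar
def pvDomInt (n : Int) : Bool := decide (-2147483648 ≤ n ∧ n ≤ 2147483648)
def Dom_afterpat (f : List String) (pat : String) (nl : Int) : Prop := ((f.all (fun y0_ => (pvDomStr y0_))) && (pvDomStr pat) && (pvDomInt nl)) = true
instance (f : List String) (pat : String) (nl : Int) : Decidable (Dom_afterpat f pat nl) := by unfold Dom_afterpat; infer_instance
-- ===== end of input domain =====

-- B: two-phase scan over one shared iterator (find the pattern line, then collect
-- until nl lines are gathered) instead of A's single flag-driven loop; same cost, plainer.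

-- ===== PORT A =====
-- the single flag-driven loop of A: state (store, listline, count), break when count == nl
def afterpatLoop (pat : String) (nl : Int) : List String → Bool → List String → Int → List String
  | [], _, acc, _ => acc
  | line :: rest, store, acc, count =>
    let acc' := if store then acc ++ [line] else acc
    let count' := if store then count + 1 else count
    let store' := if PySem.Str.isIn pat line then true else store
    if count' = nl then acc' else afterpatLoop pat nl rest store' acc' count'

def afterpat (f : List String) (pat : String) (nl : Int) : List String :=
  afterpatLoop pat nl f false [] 0

-- ===== PORT B =====
-- phase 1: advance until a line containing pat; return the rest of the iterator (none if no match)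
def afterpatFind (pat : String) : List String → Option (List String)
  | [] => none
  | line :: rest => if PySem.Str.isIn pat line then some rest else afterpatFind pat rest

-- phase 2: append lines until len(listline) == nl
def afterpatCollect (nl : Int) : List String → List String → List String
  | [], acc => acc
  | line :: rest, acc =>
    if (acc.length : Int) = nl then acc else afterpatCollect nl rest (acc ++ [line])

def afterpat_alt (f : List String) (pat : String) (nl : Int) : List String :=
  match afterpatFind pat f with
  | none => []
  | some rest => afterpatCollect nl rest []

-- ===== PRECONDITION & SPEC =====
def Spec_afterpat (f : List String) (pat : String) (nl : Int) (out : List String) : Prop := out = afterpat_alt f pat nl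
instance (f : List String) (pat : String) (nl : Int) (out : List String) : Decidable (Spec_afterpat f pat nl out) := by unfold Spec_afterpat; infer_instance

-- ===== CLAIM =====
def Claim_equal_afterpat : Prop := ∀ (f : List String) (pat : String) (nl : Int), Dom_afterpat f pat nl → Spec_afterpat f pat nl (afterpat f pat nl)

-- ===== LEMMAS AND PROOFS =====
theorem collect_full (nl : Int) (rest acc : List String) (h : (acc.length : Int) = nl) :
    afterpatCollect nl rest acc = acc := by
  cases rest with
  | nil => rfl
  | cons l r => simp [afterpatCollect, h]

-- once store is true, A's loop is B's collect phase (count tracks acc.length; count ≠ nl at entry)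
theorem loop_store_eq_collect (pat : String) (nl : Int) (rest : List String) :
    ∀ acc count, count = (acc.length : Int) → count ≠ nl →
      afterpatLoop pat nl rest true acc count = afterpatCollect nl rest acc := by
  induction rest with
  | nil => intro acc count _ _; rfl
  | cons line r ih =>
    intro acc count hc hne
    simp only [afterpatLoop, afterpatCollect, if_true, ← hc, if_neg hne,
      show (if PySem.Str.isIn pat line = true then true else true) = true by simp]
    by_cases h : count + 1 = nl
    · rw [if_pos h, collect_full nl r (acc ++ [line]) (by simp only [List.length_append, List.length_cons, List.length_nil]; push_cast; omega)]
    · rw [if_neg h, ih (acc ++ [line]) (count + 1) (by simp only [List.length_append, List.length_cons, List.length_nil]; push_cast; omega) h]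

-- the searching phase (store = false, acc = [], count = 0)
theorem loop_eq_alt (pat : String) (nl : Int) (f : List String) :
    afterpatLoop pat nl f false [] 0 = afterpat_alt f pat nl := by
  induction f with
  | nil => simp [afterpatLoop, afterpat_alt, afterpatFind]
  | cons line r ih =>
    simp only [afterpatLoop]
    norm_num
    by_cases hnl : (0 : Int) = nl
    · -- nl = 0: A breaks on the first line with []; B collects nothing
      rw [if_pos hnl]
      unfold afterpat_alt
      cases hf : afterpatFind pat (line :: r) with
      | none => rfl
      | some rest => simpa using (collect_full nl rest [] (by simpa using hnl)).symm
    · rw [if_neg hnl]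
      by_cases hin : PySem.Str.isIn pat line
      · rw [show PySem.Chars.isIn pat.toList line.toList = true from hin,
          loop_store_eq_collect pat nl r [] 0 (by simp) hnl]
        simp [afterpat_alt, afterpatFind,
          show PySem.Chars.isIn pat.toList line.toList = true from hin]
      · rw [show PySem.Chars.isIn pat.toList line.toList = false from by simpa using hin, ih]
        simp only [afterpat_alt, afterpatFind]
        rw [if_neg hin]

-- ===== VERDICT =====
theorem afterpat_spec : Claim_equal_afterpat := by
  intro f pat nl _
  unfold Spec_afterpat afterpat
  exact loop_eq_alt pat nl f
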